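-- pv_equiv track=rewrite | github.com/maxingan2412/Signal | utils/ranklist_vehicle.py | find_label_indices
-- ===== SOURCE A (Python) =====
-- def find_label_indices(label_list, target_labels, max_indices_per_label=1):
--     indices = []
--     counts = {label: 0 for label in target_labels}
--     for index, label in enumerate(label_list):
--         if label in target_labels and counts[label] < max_indices_per_label:
--             indices.append(index)
--             counts[label] += 1
--     sorted_indices = sorted(indices, key=lambda index: (label_list[index], index))
--     return sorted_indices
-- ===== SOURCE B (Python) =====
-- def find_label_indices(label_list, target_labels, max_indices_per_label=1):
--     if max_indices_per_label <= 0: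
--         return []
--     positions = {}
--     for index, label in enumerate(label_list):
--         positions.setdefault(label, []).append(index)
--     result = []
--     for label in sorted(set(target_labels)):
--         result.extend(positions.get(label, [])[:max_indices_per_label])
--     return result
-- ===== Notes on version B (the rewrite author's own statement) =====
-- stated objective: faster
-- what changed: Instead of a stateful scan with per-label counters (with an O(t) 'label in target_labels' list test per element) followed by a sort of the hit indices by (label, index), B builds a dict mapping every label to its ascending index list in one pass and then concatenates, for each distinct target label in sorted order, the first max_indices_per_label indices of its group, so the (label, index) order arises by construction without sorting indices.
import Mathlib
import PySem

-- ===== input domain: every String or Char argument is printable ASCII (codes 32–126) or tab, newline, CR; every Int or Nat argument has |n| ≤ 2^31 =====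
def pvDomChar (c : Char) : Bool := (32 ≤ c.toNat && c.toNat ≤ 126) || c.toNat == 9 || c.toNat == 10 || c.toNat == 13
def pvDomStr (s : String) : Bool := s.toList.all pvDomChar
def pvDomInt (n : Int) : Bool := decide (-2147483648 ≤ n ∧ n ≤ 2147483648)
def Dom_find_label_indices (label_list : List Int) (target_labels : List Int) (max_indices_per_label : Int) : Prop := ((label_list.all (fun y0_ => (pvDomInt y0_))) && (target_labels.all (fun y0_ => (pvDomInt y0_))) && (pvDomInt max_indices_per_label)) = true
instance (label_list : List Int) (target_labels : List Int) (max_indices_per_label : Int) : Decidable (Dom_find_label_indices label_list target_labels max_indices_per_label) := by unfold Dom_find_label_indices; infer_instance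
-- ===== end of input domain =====

-- B replaces the stateful filtered scan + sort of indices by (label, index) with one grouping
-- pass (dict label -> index list) followed by concatenating, per sorted distinct target label,
-- the first max_indices_per_label indices of that group; no sort of indices and no repeated
-- 'label in target_labels' list scan (objective: faster by a different algorithm).

-- ===== PORT A =====
-- 'counts[label]' is guarded by 'label in target_labels' and counts holds every target label
-- as a key, so Dict.getD is exact here (no KeyError reachable); 'label_list[index]' with an
-- index produced by enumerate is always in range, so pyGetD is exact; the tuple sort key goes
-- through PySem.List.sorted2.
def find_label_indices (label_list : List Int) (target_labels : List Int) (max_indices_per_label : Int) : List Int :=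
  let counts : PySem.Dict Int Int := target_labels.foldl (fun d l => d.insert l 0) PySem.Dict.empty
  let st := (PySem.List.enumerate label_list).foldl
    (fun (st : List Int × PySem.Dict Int Int) p =>
      if p.2 ∈ target_labels ∧ st.2.getD p.2 0 < max_indices_per_label then
        (st.1 ++ [p.1], st.2.insert p.2 (st.2.getD p.2 0 + 1))
      else st)
    ([], counts)
  PySem.List.sorted2 st.1 (fun index => PySem.List.pyGetD label_list index 0) (fun index => index)

-- ===== PORT B =====
-- 'positions.setdefault(label, []).append(index)' is exactly Dict.modify label [] (· ++ [index]);
-- 'positions.get(label, [])[:m]' is slice with getD; the guard 'm <= 0 -> []' is Source B's early return.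
def find_label_indices_alt (label_list : List Int) (target_labels : List Int) (max_indices_per_label : Int) : List Int :=
  if max_indices_per_label ≤ 0 then []
  else
    let positions : PySem.Dict Int (List Int) :=
      (PySem.List.enumerate label_list).foldl
        (fun d p => d.modify p.2 [] (fun v => v ++ [p.1])) PySem.Dict.empty
    (PySem.List.sorted (PySem.Set.ofList target_labels) (fun x => x)).foldl
      (fun result label =>
        result ++ PySem.List.slice (positions.getD label []) none (some max_indices_per_label)) []

-- ===== PRECONDITION & SPEC =====
def Spec_find_label_indices (label_list : List Int) (target_labels : List Int) (max_indices_per_label : Int) (out : List Int) : Prop := out = find_label_indices_alt label_list target_labels max_indices_per_label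
instance (label_list : List Int) (target_labels : List Int) (max_indices_per_label : Int) (out : List Int) : Decidable (Spec_find_label_indices label_list target_labels max_indices_per_label out) := by unfold Spec_find_label_indices; infer_instance

-- ===== CLAIM (what is proved, stated in full; the proofs are below) =====
def Claim_equal_find_label_indices : Prop := ∀ (label_list : List Int) (target_labels : List Int) (max_indices_per_label : Int), Dom_find_label_indices label_list target_labels max_indices_per_label → Spec_find_label_indices label_list target_labels max_indices_per_label (find_label_indices label_list target_labels max_indices_per_label)

-- ===== LEMMAS AND PROOFS =====

-- the pairs (index, label) selected by A's stateful loop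
def selP (tl : List Int) (m : Int) : List (Int × Int) → PySem.Dict Int Int → List (Int × Int)
  | [], _ => []
  | p :: t, c =>
    if p.2 ∈ tl ∧ c.getD p.2 0 < m then p :: selP tl m t (c.insert p.2 (c.getD p.2 0 + 1))
    else selP tl m t c

-- the pairs with label 'lab' collected by B's inner loop (first 'need' of them)
def scanP (lab : Int) : Int → List (Int × Int) → List (Int × Int)
  | _, [] => []
  | need, p :: t =>
    if need ≤ 0 then [] else if p.2 = lab then p :: scanP lab (need - 1) t else scanP lab need t

theorem foldA_eq (tl : List Int) (m : Int) (ps : List (Int × Int)) (acc : List Int)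
    (c : PySem.Dict Int Int) :
    (ps.foldl
      (fun (st : List Int × PySem.Dict Int Int) p =>
        if p.2 ∈ tl ∧ st.2.getD p.2 0 < m then
          (st.1 ++ [p.1], st.2.insert p.2 (st.2.getD p.2 0 + 1))
        else st)
      (acc, c)).1 = acc ++ (selP tl m ps c).map Prod.fst := by
  induction ps generalizing acc c with
  | nil => simp [selP]
  | cons p t ih =>
    simp only [List.foldl_cons, selP]
    split
    · rw [ih]; simp
    · rw [ih]

theorem scanP_nonpos (lab need : Int) (ps : List (Int × Int)) (h : need ≤ 0) :
    scanP lab need ps = [] := by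
  cases ps with
  | nil => rfl
  | cons p t => simp [scanP, h]

theorem filter_selP (tl : List Int) (m : Int) (lab : Int) (hl : lab ∈ tl)
    (ps : List (Int × Int)) (c : PySem.Dict Int Int) :
    (selP tl m ps c).filter (fun p => p.2 == lab) = scanP lab (m - c.getD lab 0) ps := by
  induction ps generalizing c with
  | nil => simp [selP, scanP]
  | cons p t ih =>
    simp only [selP]
    by_cases hpl : p.2 = lab
    · subst hpl
      by_cases hcnt : c.getD p.2 0 < m
      · rw [if_pos ⟨hl, hcnt⟩, List.filter_cons_of_pos (by simp), ih,
            PySem.Dict.getD_insert, if_pos rfl]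
        have h2 : ¬ (m - c.getD p.2 0 ≤ 0) := by omega
        simp only [scanP, if_neg h2]
        have h3 : m - (c.getD p.2 0 + 1) = m - c.getD p.2 0 - 1 := by omega
        rw [h3]
        simp
      · rw [if_neg (by tauto), ih, scanP_nonpos _ _ _ (by omega)]
        simp only [scanP, if_pos (by omega : m - c.getD p.2 0 ≤ 0)]
    · split
      · rw [List.filter_cons_of_neg (by simpa using hpl), ih, PySem.Dict.getD_insert,
            if_neg (fun h => hpl h.symm)]
        by_cases hn : m - c.getD lab 0 ≤ 0
        · rw [scanP_nonpos _ _ _ hn, scanP_nonpos _ _ _ hn]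
        · simp only [scanP, if_neg hn, if_neg hpl]
      · rw [ih]
        by_cases hn : m - c.getD lab 0 ≤ 0
        · rw [scanP_nonpos _ _ _ hn, scanP_nonpos _ _ _ hn]
        · simp only [scanP, if_neg hn, if_neg hpl]

theorem counts0_getD (tl : List Int) (d : PySem.Dict Int Int) (h : ∀ x, d.getD x 0 = 0)
    (lab : Int) : (tl.foldl (fun d l => d.insert l 0) d).getD lab 0 = 0 := by
  induction tl generalizing d with
  | nil => exact h lab
  | cons k t ih =>
    simp only [List.foldl_cons]
    exact ih _ (fun x => by rw [PySem.Dict.getD_insert]; split <;> [rfl; exact h x])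

theorem selP_sublist (tl : List Int) (m : Int) (ps : List (Int × Int)) (c : PySem.Dict Int Int) :
    (selP tl m ps c).Sublist ps := by
  induction ps generalizing c with
  | nil => simp [selP]
  | cons p t ih =>
    simp only [selP]
    split
    · exact List.Sublist.cons₂ p (ih _)
    · exact List.Sublist.cons p (ih _)

theorem selP_label_mem (tl : List Int) (m : Int) (ps : List (Int × Int))
    (c : PySem.Dict Int Int) (p : Int × Int) (hp : p ∈ selP tl m ps c) : p.2 ∈ tl := by
  induction ps generalizing c with
  | nil => simp [selP] at hp
  | cons q t ih =>
    simp only [selP] at hp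
    split at hp
    · rcases List.mem_cons.1 hp with h | h
      · subst h; tauto
      · exact ih _ h
    · exact ih _ hp

theorem flatMap_filter_perm (ks : List Int) (s : List (Int × Int)) (hnd : ks.Nodup)
    (hmem : ∀ p ∈ s, p.2 ∈ ks) :
    (ks.flatMap (fun l => s.filter (fun p => p.2 == l))).Perm s := by
  induction ks generalizing s with
  | nil =>
    cases s with
    | nil => simp
    | cons p t => exact absurd (hmem p List.mem_cons_self) (by simp)
  | cons k ks ih =>
    rw [List.flatMap_cons]
    have hstep : ∀ l ∈ ks, s.filter (fun p => p.2 == l)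
        = (s.filter (fun p => !(p.2 == k))).filter (fun p => p.2 == l) := by
      intro l hlk
      have hne : l ≠ k := fun h => (List.nodup_cons.1 hnd).1 (h ▸ hlk)
      rw [List.filter_filter]
      refine List.filter_congr (fun p _ => ?_)
      by_cases h : p.2 = l
      · simp [h, hne]
      · simp [h]
    have hflat : ks.flatMap (fun l => s.filter (fun p => p.2 == l))
        = ks.flatMap (fun l => (s.filter (fun p => !(p.2 == k))).filter (fun p => p.2 == l)) := by
      simp only [List.flatMap_def]
      exact congrArg List.flatten (List.map_congr_left hstep)
    rw [hflat]
    have hperm := ih (s.filter (fun p => !(p.2 == k))) (List.nodup_cons.1 hnd).2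
      (fun p hp => by
        have h1 := hmem p (List.mem_of_mem_filter hp)
        have h2 := List.of_mem_filter hp
        simp at h2
        rcases List.mem_cons.1 h1 with h | h
        · exact absurd h h2
        · exact h)
    exact (List.Perm.append_left _ hperm).trans (List.filter_append_perm _ s)

theorem flatMap_filter_pairwise (ks : List Int) (s : List (Int × Int))
    (hks : ks.Pairwise (· < ·)) (hs : s.Pairwise (fun q r => q.1 < r.1)) :
    (ks.flatMap (fun l => s.filter (fun p => p.2 == l))).Pairwise
      (fun q r => toLex (q.2, q.1) < toLex (r.2, r.1)) := by
  induction ks with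
  | nil => simp
  | cons k ks ih =>
    rw [List.flatMap_cons, List.pairwise_append]
    refine ⟨?_, ih (List.pairwise_cons.1 hks).2, ?_⟩
    · refine (hs.sublist List.filter_sublist).imp_of_mem (fun ha hb hab => ?_)
      have h1 : _ = true := List.of_mem_filter ha
      have h2 : _ = true := List.of_mem_filter hb
      simp at h1 h2
      rw [Prod.Lex.lt_iff]
      right
      exact ⟨by simp [h1, h2], hab⟩
    · intro q hq r hr
      rcases List.mem_flatMap.1 hr with ⟨l, hlk, hrl⟩
      have h1 : _ = true := List.of_mem_filter hq
      have h2 : _ = true := List.of_mem_filter hrl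
      simp at h1 h2
      have hkl : k < l := (List.pairwise_cons.1 hks).1 l hlk
      rw [Prod.Lex.lt_iff]
      left
      simp [h1, h2]
      omega

theorem comparator_eq (k1 k2 : Int → Int) :
    (fun (a b : Int) => decide (k1 a < k1 b) || (!decide (k1 b < k1 a) && decide (k2 a < k2 b)))
    = (fun a b => decide ((toLex (k1 a, k2 a) : Lex (Int × Int)) < toLex (k1 b, k2 b))) := by
  funext a b
  by_cases h1 : k1 a < k1 b <;> by_cases h2 : k1 b < k1 a <;> by_cases h3 : k2 a < k2 b <;>
    simp [h1, h2, h3, Prod.Lex.lt_iff] <;> omega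

theorem sorted2_eq_sorted_lex (xs : List Int) (k1 k2 : Int → Int) :
    PySem.List.sorted2 xs k1 k2 = PySem.List.sorted xs (fun x => (toLex (k1 x, k2 x) : Lex (Int × Int))) := by
  unfold PySem.List.sorted2 PySem.List.sorted
  simp only [if_neg (by simp : ¬ (false = true))]
  rw [comparator_eq]

theorem pyGetD_of_mem_enumerate (ll : List Int) (q : Int × Int)
    (hq : q ∈ PySem.List.enumerate ll 0) : PySem.List.pyGetD ll q.1 0 = q.2 := by
  rcases (PySem.List.mem_enumerate_iff ll 0 q).1 hq with ⟨k, hk, rfl⟩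
  simp [PySem.List.pyGetD_natCast, List.getD_eq_getElem?_getD, hk]

theorem scanP_eq_take (lab : Int) (ps : List (Int × Int)) (need : Int) :
    scanP lab need ps = (ps.filter (fun p => p.2 == lab)).take need.toNat := by
  induction ps generalizing need with
  | nil => simp [scanP]
  | cons p t ih =>
    simp only [scanP]
    by_cases h0 : need ≤ 0
    · rw [if_pos h0]
      have : need.toNat = 0 := by omega
      simp [this]
    · rw [if_neg h0]
      by_cases hp : p.2 = lab
      · rw [if_pos hp, List.filter_cons_of_pos (by simp [hp])]
        have : need.toNat = (need - 1).toNat + 1 := by omega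
        rw [this, List.take_succ_cons, ih]
      · rw [if_neg hp, List.filter_cons_of_neg (by simp [hp]), ih]

theorem positions_getD (ll : List Int) (lab : Int) :
    ((PySem.List.enumerate ll).foldl
        (fun d p => d.modify p.2 [] (fun v => v ++ [p.1])) PySem.Dict.empty).getD lab []
      = ((PySem.List.enumerate ll).filter (fun p => p.2 == lab)).map Prod.fst := by
  have h : (PySem.List.enumerate ll).foldl
        (fun d p => d.modify p.2 [] (fun v => v ++ [p.1])) PySem.Dict.empty
      = ((PySem.List.enumerate ll).map (fun p => (p.2, p.1))).foldl
        (fun d q => d.modify q.1 [] (fun v => v ++ [q.2])) PySem.Dict.empty := by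
    rw [List.foldl_map]
  rw [h, PySem.Dict.getD_foldl_modify_append, List.filter_map]
  simp [List.map_map, Function.comp_def]

-- A in closed form: sorted-by-(label,index) selection = concatenation of per-label prefixes
theorem central (ll tl : List Int) (m : Int) :
    find_label_indices ll tl m
      = (PySem.List.sorted (PySem.Set.ofList tl) (fun x => x)).flatMap
          (fun lab => (scanP lab m (PySem.List.enumerate ll)).map Prod.fst) := by
  unfold find_label_indices
  set c0 : PySem.Dict Int Int := tl.foldl (fun d l => d.insert l 0) PySem.Dict.empty with hc0
  set sel : List (Int × Int) := selP tl m (PySem.List.enumerate ll 0) c0 with hsel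
  set ks : List Int := PySem.List.sorted (PySem.Set.ofList tl) (fun x => x) with hks
  have hA1 : ((PySem.List.enumerate ll 0).foldl
      (fun (st : List Int × PySem.Dict Int Int) p =>
        if p.2 ∈ tl ∧ st.2.getD p.2 0 < m then
          (st.1 ++ [p.1], st.2.insert p.2 (st.2.getD p.2 0 + 1))
        else st) ([], c0)).1 = sel.map Prod.fst := by
    rw [foldA_eq, List.nil_append]
  have hc0getD : ∀ lab, c0.getD lab 0 = 0 := fun lab =>
    counts0_getD tl PySem.Dict.empty (fun x => by simp [PySem.Dict.getD, PySem.Dict.empty, PySem.Dict.get?]) lab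
  have hscan : ∀ lab ∈ ks, (scanP lab m (PySem.List.enumerate ll 0)).map Prod.fst
      = (sel.filter (fun p => p.2 == lab)).map Prod.fst := by
    intro lab hlk
    have hltl : lab ∈ tl := by
      rw [hks, PySem.List.mem_sorted] at hlk
      exact (PySem.Set.mem_ofList tl lab).1 hlk
    rw [hsel, filter_selP tl m lab hltl, hc0getD]
    norm_num
  have hB2 : ks.flatMap (fun lab => (scanP lab m (PySem.List.enumerate ll 0)).map Prod.fst)
      = (ks.flatMap (fun lab => sel.filter (fun p => p.2 == lab))).map Prod.fst := by
    rw [List.map_flatMap]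
    simp only [List.flatMap_def]
    exact congrArg List.flatten (List.map_congr_left hscan)
  simp only [hA1, hB2, sorted2_eq_sorted_lex]
  -- facts about sel and ks
  have hks_nodup : ks.Nodup := ((PySem.List.sorted_perm _ _ _).nodup_iff).2 (PySem.Set.nodup_ofList tl)
  have hks_pw : ks.Pairwise (· < ·) := PySem.List.sorted_ofList_pairwise_lt tl
  have hsel_sub : sel.Sublist (PySem.List.enumerate ll 0) := selP_sublist tl m _ _
  have hsel_pw : sel.Pairwise (fun q r => q.1 < r.1) :=
    (PySem.List.pairwise_lt_enumerate ll 0).sublist hsel_sub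
  have hsel_mem : ∀ p ∈ sel, p.2 ∈ ks := by
    intro p hp
    rw [hks, PySem.List.mem_sorted, PySem.Set.mem_ofList]
    exact selP_label_mem tl m _ _ p hp
  -- the flatMap is a strictly key-increasing rearrangement of sel
  have hperm : ((ks.flatMap (fun lab => sel.filter (fun p => p.2 == lab))).map Prod.fst).Perm
      (sel.map Prod.fst) := (flatMap_filter_perm ks sel hks_nodup hsel_mem).map Prod.fst
  have hpw0 := flatMap_filter_pairwise ks sel hks_pw hsel_pw
  have hpw : ((ks.flatMap (fun lab => sel.filter (fun p => p.2 == lab))).map Prod.fst).Pairwise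
      (fun a b => (toLex (PySem.List.pyGetD ll a 0, a) : Lex (Int × Int))
        < toLex (PySem.List.pyGetD ll b 0, b)) := by
    rw [List.pairwise_map]
    refine hpw0.imp_of_mem (fun hq hr hqr => ?_)
    rename_i q r
    have hqe : q ∈ PySem.List.enumerate ll 0 := by
      rcases List.mem_flatMap.1 hq with ⟨l, _, hql⟩
      exact hsel_sub.mem (List.mem_of_mem_filter hql)
    have hre : r ∈ PySem.List.enumerate ll 0 := by
      rcases List.mem_flatMap.1 hr with ⟨l, _, hrl⟩
      exact hsel_sub.mem (List.mem_of_mem_filter hrl)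
    rw [pyGetD_of_mem_enumerate ll q hqe, pyGetD_of_mem_enumerate ll r hre]
    exact hqr
  exact PySem.List.sorted_eq_of_perm_of_pairwise_lt _ _ _ hperm hpw

-- ===== VERDICT (by name: the statement is the Claim_ definition above) =====
theorem find_label_indices_spec : Claim_equal_find_label_indices := by
  intro ll tl m _hdom
  unfold Spec_find_label_indices find_label_indices_alt
  rw [central]
  by_cases hm : m ≤ 0
  · rw [if_pos hm]
    have hz : m.toNat = 0 := by omega
    have h : ∀ lab ∈ PySem.List.sorted (PySem.Set.ofList tl) (fun x => x),
        (scanP lab m (PySem.List.enumerate ll)).map Prod.fst = ([] : List Int) := by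
      intro lab _
      rw [scanP_eq_take, hz]
      simp
    simp only [List.flatMap_def]
    rw [List.map_congr_left h]
    simp
  · rw [if_neg hm, PySem.List.foldl_append_eq_flatMap, List.nil_append]
    simp only [List.flatMap_def]
    refine congrArg List.flatten (List.map_congr_left (fun lab _ => ?_))
    rw [positions_getD, PySem.List.slice_to _ (by omega : (0:Int) ≤ m),
        scanP_eq_take, ← List.map_take]
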